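-- pv_equiv track=rewrite | github.com/dabideee13/python-coding-interviews | max_seat_distance.py | calculate_max_distance
-- ===== SOURCE A (Python) =====
-- from math import ceil, floor
--
-- def calculate_max_distance(seats: list) -> int:
--     endpoints = [i for i, seat in enumerate(seats) if seat == 1]
--     n_seated = len(endpoints)
--
--     distances = [
--         (endpoints[j+1] - endpoints[j])
--         for j in range(n_seated)
--         if j < (n_seated - 1)
--     ]
--     max_dist = max(distances)
--
--     if max_dist > 1:
--         if (max_dist % 2) == 0:
--             return int(max_dist / 2)
--         return floor(max_dist / 2)
--     return 0
-- ===== SOURCE B (Python) =====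
-- def calculate_max_distance(seats: list) -> int:
--     prev = None
--     best = None
--     for i, seat in enumerate(seats):
--         if seat == 1:
--             if prev is not None:
--                 gap = i - prev
--                 if best is None or gap > best:
--                     best = gap
--             prev = i
--     if best is None:
--         raise ValueError("need at least two occupied seats")
--     return best // 2
-- ===== Notes on version B (the rewrite author's own statement) =====
-- stated objective: simpler
-- what changed: One pass tracking the last occupied index and a running maximum gap, instead of building an endpoints list, a gaps list and calling max; the even/odd branches collapse to a single floor division.
import Mathlib
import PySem

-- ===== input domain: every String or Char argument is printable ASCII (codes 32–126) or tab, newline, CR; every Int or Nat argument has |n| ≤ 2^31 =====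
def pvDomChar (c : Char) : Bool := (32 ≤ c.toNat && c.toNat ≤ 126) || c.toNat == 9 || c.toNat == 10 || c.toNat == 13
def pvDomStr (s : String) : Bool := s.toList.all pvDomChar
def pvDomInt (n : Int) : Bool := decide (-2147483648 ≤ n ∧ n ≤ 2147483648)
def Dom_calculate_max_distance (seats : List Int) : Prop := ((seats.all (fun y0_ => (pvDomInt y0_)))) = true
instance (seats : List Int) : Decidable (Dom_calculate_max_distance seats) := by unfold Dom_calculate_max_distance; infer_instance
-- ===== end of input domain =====

-- B replaces A's three intermediate lists (endpoints, gaps, max) by one pass tracking the last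
-- occupied index and a running maximum gap; the even/odd branches collapse to one floor division.

-- ===== PORT A =====
def calculate_max_distance (seats : List Int) : Int :=
  let endpoints : List Int :=
    ((PySem.List.enumerate seats 0).filter (fun p => p.2 == 1)).map (fun p => p.1)
  let n_seated : Int := endpoints.length
  let distances : List Int :=
    ((PySem.List.pyRange 0 n_seated 1).filter (fun j => j < n_seated - 1)).map
      (fun j => PySem.List.pyGetD endpoints (j + 1) 0 - PySem.List.pyGetD endpoints j 0)
  -- max([]) raises ValueError in Python; Pre_ excludes that input, the .getD 0 is never the result
  match PySem.List.max? distances (fun x => x) with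
  | none => 0
  | some max_dist =>
    if max_dist > 1 then
      if PySem.Int.mod max_dist 2 == 0 then
        PySem.Int.floordiv max_dist 2   -- int(max_dist / 2): exact for even nonneg max_dist
      else
        PySem.Int.floordiv max_dist 2   -- floor(max_dist / 2)
    else 0

-- ===== PORT B =====
def calculate_max_distance_alt (seats : List Int) : Int :=
  let st : Option Int × Option Int :=
    (PySem.List.enumerate seats 0).foldl
      (fun (st : Option Int × Option Int) (p : Int × Int) =>
        if p.2 == 1 then
          (some p.1,
            match st.1 with
            | none => st.2
            | some prev =>
              match st.2 with
              | none => some (p.1 - prev)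
              | some best => some (max best (p.1 - prev)))
        else st)
      (none, none)
  -- Python B raises ValueError when best is still None; Pre_ excludes that input
  match st.2 with
  | none => 0
  | some best => PySem.Int.floordiv best 2

-- ===== PRECONDITION & SPEC =====
-- Pre_ excludes exactly the inputs with fewer than two occupied seats, where A raises
-- ValueError (max of an empty sequence) and B raises ValueError as well.
def Pre_calculate_max_distance (seats : List Int) : Prop := 2 ≤ seats.count 1
instance (seats : List Int) : Decidable (Pre_calculate_max_distance seats) := by
  unfold Pre_calculate_max_distance; infer_instance

def pvWitness_calculate_max_distance : List Int := [1, 0, 0, 1, 0, 1]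

def Spec_calculate_max_distance (seats : List Int) (out : Int) : Prop :=
  out = calculate_max_distance_alt seats
instance (seats : List Int) (out : Int) : Decidable (Spec_calculate_max_distance seats out) := by
  unfold Spec_calculate_max_distance; infer_instance

-- ===== CLAIM (what is proved, stated in full; the proofs are below) =====
def Claim_equal_calculate_max_distance : Prop :=
  ∀ (seats : List Int), Dom_calculate_max_distance seats →
    Pre_calculate_max_distance seats →
    Spec_calculate_max_distance seats (calculate_max_distance seats)

-- ===== LEMMAS AND PROOFS =====

-- adjacent differences of a list
def pvDiffs : List Int → List Int
  | a :: b :: t => (b - a) :: pvDiffs (b :: t)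
  | _ => []

-- combining step of B's running maximum
def pvComb (acc : Option Int) (g : Int) : Option Int :=
  match acc with
  | none => some g
  | some b => some (max b g)

-- B's step once the seat test is known to succeed
def pvStep (st : Option Int × Option Int) (i : Int) : Option Int × Option Int :=
  (some i,
    match st.1 with
    | none => st.2
    | some prev =>
      match st.2 with
      | none => some (i - prev)
      | some best => some (max best (i - prev)))

theorem pvDiffs_length (e : List Int) : (pvDiffs e).length = e.length - 1 := by
  induction e with
  | nil => simp [pvDiffs]
  | cons a t ih =>
    cases t with
    | nil => simp [pvDiffs]
    | cons b t' => simp [pvDiffs] at ih ⊢; omega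

theorem pvDiffs_getElem (e : List Int) (k : Nat) (h : k < (pvDiffs e).length)
    (h1 : k < e.length) (h2 : k + 1 < e.length) :
    (pvDiffs e)[k] = e[k + 1] - e[k] := by
  induction e generalizing k with
  | nil => simp [pvDiffs] at h
  | cons a t ih =>
    cases t with
    | nil => simp [pvDiffs] at h
    | cons b t' =>
      cases k with
      | zero => simp [pvDiffs]
      | succ k' =>
        simp only [pvDiffs, List.getElem_cons_succ]
        exact ih k' (by simpa [pvDiffs] using h) (by simpa using h1) (by simpa using h2)

theorem pvDiffs_pos (e : List Int) (hp : e.Pairwise (· < ·)) :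
    ∀ g ∈ pvDiffs e, 1 ≤ g := by
  induction e with
  | nil => simp [pvDiffs]
  | cons a t ih =>
    cases t with
    | nil => simp [pvDiffs]
    | cons b t' =>
      intro g hg
      simp only [pvDiffs, List.mem_cons] at hg
      rcases hg with h | h
      · have : a < b := (List.pairwise_cons.mp hp).1 b (by simp)
        omega
      · exact ih (List.pairwise_cons.mp hp).2 g h

theorem pvFoldl_comb_some (l : List Int) (b : Int) :
    l.foldl pvComb (some b) = some (l.foldl max b) := by
  induction l generalizing b with
  | nil => rfl
  | cons x t ih => simp [pvComb, ih]

theorem pvFoldl_filter {α β : Type} (f : β → α → β) (p : α → Bool)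
    (hid : ∀ st x, p x = false → f st x = st) :
    ∀ (l : List α) (st : β), l.foldl f st = (l.filter p).foldl f st := by
  intro l
  induction l with
  | nil => intro st; rfl
  | cons x t ih =>
    intro st
    by_cases hx : p x = true
    · simp [hx, ih]
    · have hx' : p x = false := by simpa using hx
      simp [hx', hid st x hx', ih]

theorem pvSnd_fold_step (e : List Int) (a : Int) (b0 : Option Int) :
    (e.foldl pvStep (some a, b0)).2 = (pvDiffs (a :: e)).foldl pvComb b0 := by
  induction e generalizing a b0 with
  | nil => simp [pvDiffs]
  | cons x t ih =>
    simp only [List.foldl_cons, pvStep, pvDiffs]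
    cases b0 with
    | none => simpa [pvComb] using ih x (some (x - a))
    | some b => simpa [pvComb] using ih x (some (max b (x - a)))

theorem pvFoldl_max_mem (t : List Int) : ∀ a : Int, t.foldl max a ∈ a :: t := by
  induction t with
  | nil => intro a; simp
  | cons b t ih =>
    intro a
    rcases max_choice a b with hc | hc
    · rw [List.foldl_cons, hc]
      rcases List.mem_cons.mp (ih a) with h | h <;> simp [h]
    · rw [List.foldl_cons, hc]
      rcases List.mem_cons.mp (ih b) with h | h <;> simp [h]

theorem pvPyMax_eq_max? (l : List Int) :
    PySem.List.max? l (fun x => x) = l.max? := by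
  cases l with
  | nil => simp [PySem.List.max?_eq_none_iff]
  | cons x t =>
    have hne : x :: t ≠ ([] : List Int) := by simp
    obtain ⟨m, hm⟩ : ∃ m, PySem.List.max? (x :: t) (fun x => x) = some m := by
      cases h : PySem.List.max? (x :: t) (fun x => x) with
      | none => exact absurd ((PySem.List.max?_eq_none_iff _ _).mp h) hne
      | some m => exact ⟨m, rfl⟩
    have hm' : (x :: t).max? = some (t.foldl max x) := by simp [List.max?]
    rw [hm, hm']
    have h1 : m ∈ x :: t := PySem.List.max?_mem hm
    have h2 : ∀ y ∈ x :: t, y ≤ m := PySem.List.max?_isMax hm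
    have h3 : t.foldl max x ∈ x :: t := pvFoldl_max_mem t x
    have h4 : m ≤ t.foldl max x := by
      rcases List.mem_cons.mp h1 with h' | h'
      · rw [h']; exact (PySem.List.le_foldl_max t x).1
      · exact (PySem.List.le_foldl_max t x).2 m h'
    have h5 : t.foldl max x ≤ m := h2 _ h3
    have : m = t.foldl max x := le_antisymm h4 h5
    simp [this]

-- length of the endpoints list = number of 1s
theorem pvEndpoints_count (seats : List Int) :
    ∀ s : Int, ((PySem.List.enumerate seats s).filter (fun p => p.2 == 1)).length
      = seats.count 1 := by
  induction seats with
  | nil => intro s; simp [PySem.List.enumerate_nil]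
  | cons x t ih =>
    intro s
    by_cases hx : x = 1
    · simp [PySem.List.enumerate_cons, hx, ih]
    · simp [PySem.List.enumerate_cons, hx, ih]

-- the endpoints list is strictly increasing
theorem pvEndpoints_pairwise (seats : List Int) :
    (((PySem.List.enumerate seats 0).filter (fun p => p.2 == 1)).map
      (fun p : Int × Int => p.1)).Pairwise (· < ·) := by
  rw [List.pairwise_map]
  exact (PySem.List.pairwise_lt_enumerate seats 0).filter _

-- A's distances list equals pvDiffs of the endpoints
theorem pvDistances_eq (e : List Int) (hne : e ≠ []) :
    ((PySem.List.pyRange 0 (e.length : Int) 1).filter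
        (fun j => decide (j < (e.length : Int) - 1))).map
      (fun j => PySem.List.pyGetD e (j + 1) 0 - PySem.List.pyGetD e j 0)
    = pvDiffs e := by
  have hL : 1 ≤ (e.length : Int) := by
    have := List.length_pos_iff.mpr hne; exact_mod_cast this
  have hsplit : PySem.List.pyRange 0 (e.length : Int) 1
      = PySem.List.pyRange 0 ((e.length : Int) - 1) 1
        ++ PySem.List.pyRange ((e.length : Int) - 1) (e.length : Int) 1 :=
    PySem.List.pyRange_one_append 0 ((e.length : Int) - 1) (e.length : Int)
      (by omega) (by omega)
  have hfilter : (PySem.List.pyRange 0 (e.length : Int) 1).filter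
      (fun j => decide (j < (e.length : Int) - 1))
      = PySem.List.pyRange 0 ((e.length : Int) - 1) 1 := by
    rw [hsplit, List.filter_append]
    have h1 : (PySem.List.pyRange 0 ((e.length : Int) - 1) 1).filter
        (fun j => decide (j < (e.length : Int) - 1))
        = PySem.List.pyRange 0 ((e.length : Int) - 1) 1 := by
      apply List.filter_eq_self.mpr
      intro j hj
      have := (PySem.List.mem_pyRange_one).mp hj
      simpa using this.2
    have h2 : PySem.List.pyRange ((e.length : Int) - 1) (e.length : Int) 1
        = [(e.length : Int) - 1] := by
      have h := PySem.List.pyRange_one_singleton ((e.length : Int) - 1)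
      rw [sub_add_cancel] at h
      exact h
    rw [h1, h2]
    simp
  rw [hfilter]
  apply List.ext_getElem
  · simp only [List.length_map, PySem.List.length_pyRange_one, pvDiffs_length]
    omega
  · intro k hk hk'
    have hkL : k < e.length - 1 := by
      rw [pvDiffs_length] at hk'; omega
    have hget : (PySem.List.pyRange 0 ((e.length : Int) - 1) 1)[k]'(by
        simpa [PySem.List.length_pyRange_one] using (by omega : k < ((e.length:Int)-1).toNat))
        = (k : Int) := by
      rw [PySem.List.getElem_pyRange_one]; ring
    rw [List.getElem_map]
    rw [hget]
    have hk1 : ((k : Int) + 1) = ((k + 1 : Nat) : Int) := by push_cast; ring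
    rw [hk1, PySem.List.pyGetD_natCast, PySem.List.pyGetD_natCast]
    rw [List.getD_eq_getElem _ _ (by omega), List.getD_eq_getElem _ _ (by omega)]
    rw [pvDiffs_getElem e k hk' (by omega) (by omega)]

-- ===== VERDICT (by name: the statement is the Claim_ definition above) =====
theorem calculate_max_distance_spec : Claim_equal_calculate_max_distance := by
  intro seats _ hpre
  unfold Spec_calculate_max_distance Pre_calculate_max_distance at *
  set E := (PySem.List.enumerate seats 0).filter (fun p => p.2 == 1) with hE
  set e := E.map (fun p : Int × Int => p.1) with he
  have hlen : e.length = seats.count 1 := by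
    simp [he, hE, pvEndpoints_count seats 0]
  have hpw : e.Pairwise (· < ·) := pvEndpoints_pairwise seats
  have hlen2 : 2 ≤ e.length := by omega
  -- e = a :: rest
  obtain ⟨a, rest, hae⟩ := List.exists_cons_of_ne_nil
    (l := e) (by intro h; rw [h] at hlen2; simp at hlen2)
  -- B's fold reduces to pvStep over e
  have hB : calculate_max_distance_alt seats
      = (match (pvDiffs e).foldl pvComb none with
         | none => 0
         | some best => PySem.Int.floordiv best 2) := by
    have hfold : (PySem.List.enumerate seats 0).foldl
        (fun (st : Option Int × Option Int) (p : Int × Int) =>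
          if p.2 == 1 then
            (some p.1,
              match st.1 with
              | none => st.2
              | some prev =>
                match st.2 with
                | none => some (p.1 - prev)
                | some best => some (max best (p.1 - prev)))
          else st)
        (none, none)
        = e.foldl pvStep (none, none) := by
      rw [pvFoldl_filter _ (fun p : Int × Int => p.2 == 1)
        (by intro st x hx; simp [hx]) (PySem.List.enumerate seats 0) (none, none)]
      rw [← hE, he, List.foldl_map]
      apply PySem.List.foldl_congr_mem
      intro acc x hx
      have : x.2 == 1 := by
        rw [hE] at hx
        exact (List.mem_filter.mp hx).2
      simp [this, pvStep]
    simp only [calculate_max_distance_alt]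
    rw [hfold, hae, List.foldl_cons]
    have hinit : pvStep (none, none) a = (some a, none) := by simp [pvStep]
    rw [hinit, pvSnd_fold_step rest a none]
  -- A reduces to max? of pvDiffs e
  have hA : calculate_max_distance seats
      = (match (pvDiffs e).max? with
         | none => 0
         | some m => if m > 1 then
             (if PySem.Int.mod m 2 == 0 then PySem.Int.floordiv m 2
              else PySem.Int.floordiv m 2) else 0) := by
    simp only [calculate_max_distance]
    rw [← hE, ← he]
    rw [pvDistances_eq e (by rw [hae]; simp)]
    rw [pvPyMax_eq_max?]
  rw [hA, hB]
  -- both run over pvDiffs e, which is nonempty with all elements ≥ 1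
  have hdne : pvDiffs e ≠ [] := by
    have := pvDiffs_length e
    intro hnil
    rw [hnil] at this
    simp at this
    omega
  obtain ⟨d, ds, hds⟩ : ∃ d ds, pvDiffs e = d :: ds := by
    cases hd : pvDiffs e with
    | nil => exact absurd hd hdne
    | cons d ds => exact ⟨d, ds, rfl⟩
  rw [hds]
  have hcomb : (d :: ds).foldl pvComb none = some (ds.foldl max d) := by
    simp only [List.foldl_cons, pvComb]
    exact pvFoldl_comb_some ds d
  have hmax? : (d :: ds).max? = some (ds.foldl max d) := by simp [List.max?]
  rw [hcomb, hmax?]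
  have hmem : ds.foldl max d ∈ d :: ds := pvFoldl_max_mem ds d
  have hge1 : 1 ≤ ds.foldl max d := by
    apply pvDiffs_pos e hpw
    rw [hds]; exact hmem
  by_cases hgt : ds.foldl max d > 1
  · simp only [hgt, if_true]
    split <;> rfl
  · have hone : ds.foldl max d = 1 := by omega
    simp [hone]
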